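-- pv_equiv track=rewrite | github.com/KennyKang-git/zspin | zsim_v1_0/zsim/lgt/loops.py | plaquette_incidence
-- ===== SOURCE A (Python) =====
-- from collections import defaultdict
--
-- Loop = tuple[int, ...]
--
-- def plaquette_incidence(plaquettes: tuple[Loop, ...]) -> dict[tuple[int, int], tuple[int, ...]]:
--     incidence: dict[tuple[int, int], list[int]] = defaultdict(list)
--     for p_index, loop in enumerate(plaquettes):
--         n = len(loop)
--         for i in range(n):
--             a = loop[i]
--             b = loop[(i + 1) % n]
--             key = (a, b) if a < b else (b, a)
--             incidence[key].append(p_index)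
--     return {key: tuple(indices) for key, indices in incidence.items()}
-- ===== SOURCE B (Python) =====
-- def plaquette_incidence(plaquettes):
--     pairs = [((a, b) if a < b else (b, a), p)
--              for p, loop in enumerate(plaquettes)
--              for a, b in zip(loop, loop[1:] + loop[:1])]
--     keys = list(dict.fromkeys(k for k, _ in pairs))
--     return {k: tuple(p for kk, p in pairs if kk == k) for k in keys}
-- ===== Notes on version B (the rewrite author's own statement) =====
-- stated objective: alternative
-- what changed: Replaces streaming defaultdict aggregation inside nested index loops with a flat one-pass emission of (edge-key, plaquette-index) pairs built by zipping each loop with its rotation, followed by an ordered key dedup and a per-key filter to collect indices (order-preserving group-by without a mutable dict).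
import Mathlib
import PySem

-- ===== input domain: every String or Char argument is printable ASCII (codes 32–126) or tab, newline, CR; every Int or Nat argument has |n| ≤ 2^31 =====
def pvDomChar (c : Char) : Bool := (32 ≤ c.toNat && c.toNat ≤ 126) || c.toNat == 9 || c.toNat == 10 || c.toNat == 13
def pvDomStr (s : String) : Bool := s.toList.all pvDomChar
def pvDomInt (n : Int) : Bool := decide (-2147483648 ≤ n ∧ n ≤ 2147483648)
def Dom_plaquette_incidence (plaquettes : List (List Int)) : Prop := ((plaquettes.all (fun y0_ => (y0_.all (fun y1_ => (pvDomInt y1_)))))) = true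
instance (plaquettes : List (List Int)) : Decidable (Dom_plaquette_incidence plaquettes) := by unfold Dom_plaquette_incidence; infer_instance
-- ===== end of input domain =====

-- B replaces A's streaming defaultdict aggregation with flat pair emission + ordered dedup + per-key filter (alternative decomposition, same result).

-- ===== PORT A =====
-- the dict with key (a,b) and tuple value is flattened to Int × Int × List Int at the end (type convention)
def plaquette_incidence (plaquettes : List (List Int)) : List (Int × Int × List Int) :=
  let incidence : PySem.Dict (Int × Int) (List Int) :=
    (PySem.List.enumerate plaquettes 0).foldl (fun d pl =>
      let pIndex := pl.1
      let loop := pl.2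
      let n : Int := loop.length
      (PySem.List.pyRange 0 n 1).foldl (fun d i =>
        let a := PySem.List.pyGetD loop i 0
        let b := PySem.List.pyGetD loop (PySem.Int.mod (i + 1) n) 0
        let key := if a < b then (a, b) else (b, a)
        d.modify key [] (fun l => l ++ [pIndex])) d) PySem.Dict.empty
  ((incidence.items.foldl (fun d kv => d.insert kv.1 kv.2) PySem.Dict.empty).items).map
    (fun kv => (kv.1.1, kv.1.2, kv.2))


-- ===== PORT B =====
def plaquette_incidence_alt (plaquettes : List (List Int)) : List (Int × Int × List Int) :=
  let pairs : List ((Int × Int) × Int) :=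
    (PySem.List.enumerate plaquettes 0).flatMap (fun pl =>
      (pl.2.zip (PySem.List.slice pl.2 (some 1) none ++ PySem.List.slice pl.2 none (some 1))).map
        (fun ab => ((if ab.1 < ab.2 then (ab.1, ab.2) else (ab.2, ab.1)), pl.1)))
  let keys := PySem.List.dedup (pairs.map (·.1))
  keys.map (fun k => (k.1, k.2, (pairs.filter (fun kp => kp.1 == k)).map (·.2)))


-- ===== PRECONDITION & SPEC =====
def Spec_plaquette_incidence (plaquettes : List (List Int)) (out : List (Int × Int × List Int)) : Prop := out = plaquette_incidence_alt plaquettes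
instance (plaquettes : List (List Int)) (out : List (Int × Int × List Int)) : Decidable (Spec_plaquette_incidence plaquettes out) := by unfold Spec_plaquette_incidence; infer_instance

-- ===== CLAIM (what is proved, stated in full; the proofs are below) =====
def Claim_equal_plaquette_incidence : Prop := ∀ (plaquettes : List (List Int)), Dom_plaquette_incidence plaquettes → Spec_plaquette_incidence plaquettes (plaquette_incidence plaquettes)

-- ===== LEMMAS AND PROOFS =====

-- a fold over a flatMap is the nested fold
theorem pv_foldl_flatMap {α β γ : Type} (l : List α) (f : α → List β) (g : γ → β → γ) (init : γ) :
    (l.flatMap f).foldl g init = l.foldl (fun acc x => (f x).foldl g acc) init := by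
  induction l generalizing init with
  | nil => rfl
  | cons x xs ih => simp [List.flatMap_cons, List.foldl_append, ih]


-- the edge list A visits by index arithmetic with wraparound equals the zip-with-rotation list B builds
theorem pv_edges_eq (loop : List Int) :
    (PySem.List.pyRange 0 (loop.length : Int) 1).map
      (fun i => (PySem.List.pyGetD loop i 0,
                 PySem.List.pyGetD loop (PySem.Int.mod (i + 1) (loop.length : Int)) 0))
    = loop.zip (PySem.List.slice loop (some 1) none ++ PySem.List.slice loop none (some 1)) := by
  rcases loop with _ | ⟨x, xs⟩
  · rfl
  · set l := x :: xs with hl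
    have hn : 0 < l.length := by simp [hl]
    rw [PySem.List.slice_from_one, PySem.List.slice_to _ (by norm_num)]
    apply List.ext_getElem
    · simp [PySem.List.length_pyRange_one]
      omega
    · intro k h1 h2
      have hk : k < l.length := by
        simpa [PySem.List.length_pyRange_one] using h1
      simp only [List.getElem_map, PySem.List.getElem_pyRange_one, List.getElem_zip]
      have hmod : PySem.Int.mod ((0 + (k:Int)) + 1) (l.length : Int)
          = (((k + 1) % l.length : Nat) : Int) := by
        rw [PySem.Int.mod_eq_emod_of_pos (show (0:Int) < (l.length:Int) by exact_mod_cast hn)]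
        push_cast
        congr 1
        omega
      rw [hmod]
      have h0k : (0 : Int) + (k : Int) = ((k : Nat) : Int) := by omega
      rw [h0k]
      simp only [PySem.List.pyGetD_natCast]
      simp only [Prod.mk.injEq]
      constructor
      · rw [List.getD_eq_getElem _ _ hk]
      · rw [List.getD_eq_getElem _ _ (by exact Nat.mod_lt _ hn)]
        rcases Nat.lt_or_ge (k+1) l.length with hlt | hge
        · have : (k+1) % l.length = k + 1 := Nat.mod_eq_of_lt hlt
          rw [List.getElem_append_left (by simpa [List.length_tail] using (by omega : k < l.length - 1))]
          simp [this, List.getElem_tail]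
        · have hke : k + 1 = l.length := by omega
          have : (k+1) % l.length = 0 := by rw [hke]; exact Nat.mod_self _
          rw [List.getElem_append_right (by simp [List.length_tail]; omega)]
          simp [this, List.length_tail]
          congr 1
          omega


-- A's nested dict aggregation, flattened and regrouped, is B's dedup-and-filter result
theorem pv_main (plaquettes : List (List Int)) :
    plaquette_incidence plaquettes = plaquette_incidence_alt plaquettes := by
  simp only [plaquette_incidence, plaquette_incidence_alt]
  set pairs : List ((Int × Int) × Int) :=
    (PySem.List.enumerate plaquettes 0).flatMap (fun pl =>
      (pl.2.zip (PySem.List.slice pl.2 (some 1) none ++ PySem.List.slice pl.2 none (some 1))).map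
        (fun ab => ((if ab.1 < ab.2 then (ab.1, ab.2) else (ab.2, ab.1)), pl.1))) with hpairs
  have hdict :
      (PySem.List.enumerate plaquettes 0).foldl (fun d pl =>
        (PySem.List.pyRange 0 (pl.2.length : Int) 1).foldl (fun d i =>
          let a := PySem.List.pyGetD pl.2 i 0
          let b := PySem.List.pyGetD pl.2 (PySem.Int.mod (i + 1) (pl.2.length : Int)) 0
          let key := if a < b then (a, b) else (b, a)
          d.modify key [] (fun l => l ++ [pl.1])) d) PySem.Dict.empty
      = pairs.foldl (fun d p => d.modify p.1 [] (fun l => l ++ [p.2])) PySem.Dict.empty := by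
    rw [hpairs, pv_foldl_flatMap]
    have hfun : (fun (d : PySem.Dict (Int × Int) (List Int)) (pl : Int × List Int) =>
        ((pl.2.zip (PySem.List.slice pl.2 (some 1) none ++ PySem.List.slice pl.2 none (some 1))).map
          (fun ab => ((if ab.1 < ab.2 then (ab.1, ab.2) else (ab.2, ab.1)), pl.1))).foldl
            (fun d p => d.modify p.1 [] (fun l => l ++ [p.2])) d)
        = (fun d pl =>
        (PySem.List.pyRange 0 (pl.2.length : Int) 1).foldl (fun d i =>
          let a := PySem.List.pyGetD pl.2 i 0
          let b := PySem.List.pyGetD pl.2 (PySem.Int.mod (i + 1) (pl.2.length : Int)) 0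
          let key := if a < b then (a, b) else (b, a)
          d.modify key [] (fun l => l ++ [pl.1])) d) := by
      funext d pl
      rw [← pv_edges_eq pl.2, List.map_map, List.foldl_map]
      rfl
    rw [hfun]
  set d := pairs.foldl (fun d p => d.modify p.1 [] (fun l => l ++ [p.2])) PySem.Dict.empty with hd
  have hkeys : d.keys = PySem.List.dedup (pairs.map (·.1)) := by
    rw [hd, PySem.Dict.keys_foldl_modify_key]
    simp [PySem.Dict.keys_empty, PySem.Set.update_nil_left, PySem.List.dedup_eq_ofList]
  have hnd : d.keys.Nodup := by
    rw [hd]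
    exact PySem.Dict.nodup_keys_foldl_modify_key _ _ _ _ _ (by simp [PySem.Dict.keys_empty])
  have hitems : d.items = d.keys.map (fun k => (k, d.getD k [])) :=
    PySem.Dict.items_eq_map_keys d hnd []
  have hgetD : ∀ k, d.getD k [] = (pairs.filter (fun kp => kp.1 == k)).map (·.2) := by
    intro k
    rw [hd, PySem.Dict.getD_foldl_modify_append, PySem.Dict.getD_empty]
    simp
  have hfresh : ((d.items.foldl (fun e kv => e.insert kv.1 kv.2) PySem.Dict.empty)).items
      = d.items := by
    rw [PySem.Dict.items_foldl_insert_fresh _ _ _ _ (fun a _ => PySem.Dict.contains_empty _) (by exact hnd)]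
    show [] ++ _ = _
    simp
  rw [hdict, hfresh, hitems, hkeys, List.map_map]
  apply List.map_congr_left
  intro k _
  simp [hgetD k]

-- ===== VERDICT (by name: the statement is the Claim_ definition above) =====
theorem plaquette_incidence_spec : Claim_equal_plaquette_incidence := by
  intro plaquettes _
  exact pv_main plaquettes
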